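-- pv_equiv track=rewrite | github.com/shuu1412/PY-HIT-2021 | Buổi 3/Bai1.py | ss10
-- ===== SOURCE A (Python) =====
-- def ss10(a: str, b: str) ->bool:
--     '''
--     :params:
--     input:
--         hai số cần so sánh
--     output:
--         trả về True nếu 2 số có vị trí của 1 và 0 tương tự nhau
--         Nếu không trả về False
--     '''
--     x = set()
--     y = set()
--     for i in range(len(a)):
--         if a[i]=='1' or a[i]=='0':
--             x.add(i)
--     for i in range(len(b)):
--         if b[i]=='1' or b[i]=='0':
--             y.add(i)
--     if x==y:
--         return True
--     else:
--         return False
-- ===== SOURCE B (Python) =====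
-- def ss10(a: str, b: str) -> bool:
--     n = max(len(a), len(b))
--     for i in range(n):
--         av = i < len(a) and a[i] in '01'
--         bv = i < len(b) and b[i] in '01'
--         if av != bv:
--             return False
--     return True
-- ===== Notes on version B (the rewrite author's own statement) =====
-- stated objective: simpler
-- what changed: B replaces A's two index-set constructions and set comparison by a single fused pass over positions 0..max(len(a),len(b)) that compares the is-binary-digit flag of both strings at each position and returns False at the first mismatch.
import Mathlib
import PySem

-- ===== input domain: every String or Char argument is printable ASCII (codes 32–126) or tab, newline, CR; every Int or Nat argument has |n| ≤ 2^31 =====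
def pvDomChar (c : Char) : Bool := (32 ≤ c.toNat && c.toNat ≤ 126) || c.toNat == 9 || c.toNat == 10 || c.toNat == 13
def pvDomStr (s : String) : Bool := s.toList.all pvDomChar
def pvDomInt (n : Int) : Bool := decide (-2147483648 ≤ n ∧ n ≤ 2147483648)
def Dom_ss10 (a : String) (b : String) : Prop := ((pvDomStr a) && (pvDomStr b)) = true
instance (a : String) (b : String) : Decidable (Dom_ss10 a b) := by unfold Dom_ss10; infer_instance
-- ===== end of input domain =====

-- B fuses A's two index-set builds + set comparison into one positional scan; objective: simpler.

-- ===== PORT A =====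
-- the set of indices i with s[i] in {'1','0'}, built exactly as A builds x and y
def pvIdxSet (s : String) : PySem.Set Int :=
  (PySem.List.pyRange 0 (s.length : Int) 1).foldl
    (fun acc i =>
      if PySem.Str.pyGet? s i == some '1' || PySem.Str.pyGet? s i == some '0'
      then PySem.Set.add acc i else acc)
    PySem.Set.empty

def ss10 (a : String) (b : String) : Bool :=
  let x := pvIdxSet a
  let y := pvIdxSet b
  if PySem.Set.equal x y then true else false

-- ===== PORT B =====
-- av/bv of Source B: i < len(s) and s[i] in '01'
def pvBv (s : String) (i : Nat) : Bool :=
  match s.toList[i]? with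
  | some c => c == '0' || c == '1'
  | none => false

def ss10_alt (a : String) (b : String) : Bool :=
  let n := max a.length b.length
  (List.range n).all (fun i => pvBv a i == pvBv b i)

-- ===== PRECONDITION & SPEC =====
def Spec_ss10 (a : String) (b : String) (out : Bool) : Prop := out = ss10_alt a b
instance (a : String) (b : String) (out : Bool) : Decidable (Spec_ss10 a b out) := by unfold Spec_ss10; infer_instance

-- ===== CLAIM (what is proved, stated in full; the proofs are below) =====
def Claim_equal_ss10 : Prop := ∀ (a : String) (b : String), Dom_ss10 a b → Spec_ss10 a b (ss10 a b)

-- ===== LEMMAS AND PROOFS =====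

theorem mem_condFoldl (p : Int → Bool) (l : List Int) :
    ∀ (s : PySem.Set Int) (y : Int),
      (y ∈ l.foldl (fun acc i => if p i then PySem.Set.add acc i else acc) s)
        ↔ y ∈ s ∨ (y ∈ l ∧ p y = true) := by
  induction l with
  | nil => intro s y; simp
  | cons h t ih =>
    intro s y
    by_cases hp : p h = true
    · simp only [List.foldl_cons, hp, if_pos, ih, PySem.Set.mem_add, List.mem_cons]
      constructor
      · rintro (⟨hs | rfl⟩ | ⟨ht, hy⟩)
        · exact Or.inl hs
        · exact Or.inr ⟨Or.inl rfl, hp⟩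
        · exact Or.inr ⟨Or.inr ht, hy⟩
      · rintro (hs | ⟨rfl | ht, hy⟩)
        · exact Or.inl (Or.inl hs)
        · exact Or.inl (Or.inr rfl)
        · exact Or.inr ⟨ht, hy⟩
    · simp only [List.foldl_cons, hp, if_neg, Bool.false_eq_true, not_false_iff, ih,
        List.mem_cons]
      constructor
      · rintro (hs | ⟨ht, hy⟩)
        · exact Or.inl hs
        · exact Or.inr ⟨Or.inr ht, hy⟩
      · rintro (hs | ⟨rfl | ht, hy⟩)
        · exact Or.inl hs
        · exact absurd hy hp
        · exact Or.inr ⟨ht, hy⟩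

theorem pvBv_of_ge (s : String) (k : Nat) (h : s.toList.length ≤ k) : pvBv s k = false := by
  simp [pvBv, List.getElem?_eq_none h]

theorem mem_pvIdxSet_natCast (s : String) (k : Nat) :
    ((k : Int) ∈ pvIdxSet s) ↔ pvBv s k = true := by
  unfold pvIdxSet
  rw [mem_condFoldl]
  simp only [PySem.Set.empty, List.not_mem_nil, false_or, PySem.List.mem_pyRange_one,
    PySem.Str.pyGet?_natCast]
  constructor
  · rintro ⟨⟨-, hk⟩, hp⟩
    cases hg : s.toList[k]? with
    | none => simp [hg] at hp
    | some c =>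
      simp only [hg] at hp
      simp only [pvBv, hg]
      rcases Bool.or_eq_true_iff.mp hp with h1 | h0
      · simp_all
      · simp_all
  · intro hp
    have hk : k < s.toList.length := by
      by_contra hk
      rw [pvBv_of_ge s k (le_of_not_gt hk)] at hp
      exact Bool.false_ne_true hp
    refine ⟨⟨Int.natCast_nonneg k, ?_⟩, ?_⟩
    · have := @String.length_toList s
      omega
    · cases hg : s.toList[k]? with
      | none =>
        have := List.getElem?_eq_none_iff.mp hg
        omega
      | some c =>
        simp only [pvBv, hg] at hp
        rcases Bool.or_eq_true_iff.mp hp with h0 | h1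
        · simp_all
        · simp_all

theorem not_mem_pvIdxSet_neg (s : String) (i : Int) (h : i < 0) : i ∉ pvIdxSet s := by
  unfold pvIdxSet
  rw [mem_condFoldl]
  simp only [PySem.Set.empty, List.not_mem_nil, false_or, PySem.List.mem_pyRange_one]
  rintro ⟨⟨h0, -⟩, -⟩
  omega

theorem ss10_eq (a b : String) : ss10 a b = ss10_alt a b := by
  rw [Bool.eq_iff_iff]
  unfold ss10 ss10_alt
  simp only [List.all_eq_true, List.mem_range, beq_iff_eq]
  constructor
  · intro h
    have heq : PySem.Set.equal (pvIdxSet a) (pvIdxSet b) = true := by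
      by_contra hne
      simp only [Bool.not_eq_true] at hne
      simp [hne] at h
    have hmem := (PySem.Set.equal_iff _ _).mp heq
    intro k _
    have := hmem (k : Int)
    rw [mem_pvIdxSet_natCast, mem_pvIdxSet_natCast] at this
    cases hA : pvBv a k <;> cases hB : pvBv b k <;> simp_all
  · intro h
    have heq : PySem.Set.equal (pvIdxSet a) (pvIdxSet b) = true := by
      rw [PySem.Set.equal_iff]
      intro i
      rcases lt_or_ge i 0 with hi | hi
      · constructor
        · intro hm; exact absurd hm (not_mem_pvIdxSet_neg a i hi)
        · intro hm; exact absurd hm (not_mem_pvIdxSet_neg b i hi)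
      · lift i to ℕ using hi with k
        rw [mem_pvIdxSet_natCast, mem_pvIdxSet_natCast]
        rcases lt_or_ge k (max a.length b.length) with hk | hk
        · rw [h k hk]
        · have hla : a.toList.length ≤ k := by
            have := @String.length_toList a
            omega
          have hlb : b.toList.length ≤ k := by
            have := @String.length_toList b
            omega
          rw [pvBv_of_ge a k hla, pvBv_of_ge b k hlb]
    simp [heq]

-- ===== VERDICT (by name: the statement is the Claim_ definition above) =====
theorem ss10_spec : Claim_equal_ss10 := by
  intro a b _
  unfold Spec_ss10
  exact ss10_eq a b
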